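-- pv_equiv track=rewrite | github.com/IrisHub/iris-yummly-data-cleaning | yummly_data_processing.py | diet_function
-- ===== SOURCE A (Python) =====
-- def diet_function(e):
-- 	vegetarian_exclude = ['meat', 'gelatin', 'chicken', 'turkey', 'duck', 'quail',
-- 		'beef', 'pork', 'bacon', 'lamb', 'mutton', 'venison', 'rabbit', 'goat',
-- 		'salmon', 'fish', 'tuna', 'cod', 'tilapia', 'bass',
-- 		'shrimp', 'oyster', 'crab', 'clam', 'octopus', 'eel']
-- 	vegan_exclude = ['milk', 'cheese', 'yogurt', 'egg', 'honey', 'butter', 'cream', 'custard', 'ghee', 'queso', 'paneer']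
-- 	pescatarian_exclude = ['meat', 'gelatin', 'chicken', 'turkey', 'duck', 'quail',
-- 		'beef', 'pork', 'bacon', 'lamb', 'mutton', 'venison', 'rabbit', 'goat',]
-- 	nonveg_ingredients = list(filter(lambda item: any(ing in item for ing in vegetarian_exclude), e['ingredientLines']))
-- 	nonvegan_ingredients = list(filter(lambda item: any(ing in item for ing in vegan_exclude), e['ingredientLines']))
--
-- 	if len(pescatarian_exclude) == 0 and len(nonveg_ingredients) > 0:
-- 		return 'pescatarian'
-- 	elif len(nonveg_ingredients) == 0 and len(nonvegan_ingredients) == 0: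
-- 		return 'vegan'
-- 	elif len(nonveg_ingredients) == 0 and len(nonvegan_ingredients) > 0:
-- 		return 'vegetarian'
-- 	else:
-- 		return 'none'
-- ===== SOURCE B (Python) =====
-- def diet_function(e):
-- 	vegetarian_exclude = ['meat', 'gelatin', 'chicken', 'turkey', 'duck', 'quail',
-- 		'beef', 'pork', 'bacon', 'lamb', 'mutton', 'venison', 'rabbit', 'goat',
-- 		'salmon', 'fish', 'tuna', 'cod', 'tilapia', 'bass',
-- 		'shrimp', 'oyster', 'crab', 'clam', 'octopus', 'eel']
-- 	vegan_exclude = ['milk', 'cheese', 'yogurt', 'egg', 'honey', 'butter', 'cream', 'custard', 'ghee', 'queso', 'paneer']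
-- 	has_nonveg = False
-- 	has_nonvegan = False
-- 	for item in e['ingredientLines']:
-- 		if not has_nonveg and any(ing in item for ing in vegetarian_exclude):
-- 			has_nonveg = True
-- 		if not has_nonvegan and any(ing in item for ing in vegan_exclude):
-- 			has_nonvegan = True
-- 		if has_nonveg and has_nonvegan:
-- 			break
-- 	if has_nonveg:
-- 		return 'none'
-- 	return 'vegetarian' if has_nonvegan else 'vegan'
-- ===== Notes on version B (the rewrite author's own statement) =====
-- stated objective: alternative
-- what changed: Replaces the two list(filter(...)) passes that materialise ingredient sublists with a single early-exiting loop maintaining two boolean flags, and drops the unreachable pescatarian branch (its guard needs len(pescatarian_exclude)==0 but that list is a nonempty constant).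
import Mathlib
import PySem

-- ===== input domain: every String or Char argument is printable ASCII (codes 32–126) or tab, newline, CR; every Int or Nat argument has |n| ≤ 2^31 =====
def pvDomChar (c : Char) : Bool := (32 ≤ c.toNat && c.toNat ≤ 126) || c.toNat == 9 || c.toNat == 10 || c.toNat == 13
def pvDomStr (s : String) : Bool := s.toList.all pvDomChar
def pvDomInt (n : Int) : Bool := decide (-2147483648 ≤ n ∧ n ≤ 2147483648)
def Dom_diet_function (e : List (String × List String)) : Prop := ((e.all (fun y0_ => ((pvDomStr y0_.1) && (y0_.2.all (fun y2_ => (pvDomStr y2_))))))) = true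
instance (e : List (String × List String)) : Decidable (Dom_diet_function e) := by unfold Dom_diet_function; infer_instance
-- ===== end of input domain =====

-- B replaces A's two filter passes by one early-exiting flag loop and drops the
-- unreachable pescatarian branch; equivalence of the RETURN value is proved on
-- inputs carrying the 'ingredientLines' key (Python A raises KeyError otherwise).

-- ===== PORT A =====
def vegetarianExcludeA : List String := ["meat", "gelatin", "chicken", "turkey", "duck", "quail",
  "beef", "pork", "bacon", "lamb", "mutton", "venison", "rabbit", "goat",
  "salmon", "fish", "tuna", "cod", "tilapia", "bass",
  "shrimp", "oyster", "crab", "clam", "octopus", "eel"]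
def veganExcludeA : List String := ["milk", "cheese", "yogurt", "egg", "honey", "butter", "cream", "custard", "ghee", "queso", "paneer"]
def pescatarianExcludeA : List String := ["meat", "gelatin", "chicken", "turkey", "duck", "quail",
  "beef", "pork", "bacon", "lamb", "mutton", "venison", "rabbit", "goat"]

def diet_function (e : List (String × List String)) : String :=
  let lines := ((PySem.Dict.mk e).get? "ingredientLines").getD []   -- e['ingredientLines']; Pre_ guarantees the key exists
  let nonveg := lines.filter (fun item => vegetarianExcludeA.any (fun ing => PySem.Str.isIn ing item))
  let nonvegan := lines.filter (fun item => veganExcludeA.any (fun ing => PySem.Str.isIn ing item))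
  if pescatarianExcludeA.length = 0 ∧ nonveg.length > 0 then "pescatarian"
  else if nonveg.length = 0 ∧ nonvegan.length = 0 then "vegan"
  else if nonveg.length = 0 ∧ nonvegan.length > 0 then "vegetarian"
  else "none"

-- ===== PORT B =====
def vegetarianExcludeB : List String := ["meat", "gelatin", "chicken", "turkey", "duck", "quail",
  "beef", "pork", "bacon", "lamb", "mutton", "venison", "rabbit", "goat",
  "salmon", "fish", "tuna", "cod", "tilapia", "bass",
  "shrimp", "oyster", "crab", "clam", "octopus", "eel"]
def veganExcludeB : List String := ["milk", "cheese", "yogurt", "egg", "honey", "butter", "cream", "custard", "ghee", "queso", "paneer"]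

-- Source B's loop: one pass over the lines, two flags, early break once both are set
def dietAltLoop (items : List String) (hasNonveg hasNonvegan : Bool) : String :=
  match items with
  | [] =>
    if hasNonveg then "none"
    else if hasNonvegan then "vegetarian" else "vegan"
  | item :: rest =>
    let hv := if !hasNonveg && vegetarianExcludeB.any (fun ing => PySem.Str.isIn ing item) then true else hasNonveg
    let hn := if !hasNonvegan && veganExcludeB.any (fun ing => PySem.Str.isIn ing item) then true else hasNonvegan
    if hv && hn then "none"   -- break: the loop exits and the final ifs return 'none'
    else dietAltLoop rest hv hn

def diet_function_alt (e : List (String × List String)) : String :=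
  dietAltLoop (((PySem.Dict.mk e).get? "ingredientLines").getD []) false false

-- ===== PRECONDITION & SPEC =====
-- Pre_ excludes only inputs whose association list has no 'ingredientLines' key: Python A raises KeyError there.
def Pre_diet_function (e : List (String × List String)) : Prop := "ingredientLines" ∈ e.map Prod.fst
instance (e : List (String × List String)) : Decidable (Pre_diet_function e) := by unfold Pre_diet_function; infer_instance
def pvWitness_diet_function : (List (String × List String)) := [("ingredientLines", ["rice", "milk"])]

def Spec_diet_function (e : List (String × List String)) (out : String) : Prop := out = diet_function_alt e
instance (e : List (String × List String)) (out : String) : Decidable (Spec_diet_function e out) := by unfold Spec_diet_function; infer_instance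

-- ===== CLAIM (what is proved, stated in full; the proofs are below) =====
def Claim_equal_diet_function : Prop := ∀ (e : List (String × List String)), Dom_diet_function e → Pre_diet_function e → Spec_diet_function e (diet_function e)

-- ===== LEMMAS AND PROOFS =====

-- an ∃/∀ clash over the same exclude list is absurd (used to close contradictory branches)
theorem pvNoAny {L : List String} {t : String}
    (h1 : (L.any fun ing => PySem.Chars.isIn ing.toList t.toList) = true)
    (h2 : ∀ x ∈ L, PySem.Chars.isIn x.toList t.toList = false) : False := by
  rw [List.any_eq_true] at h1
  obtain ⟨x, hx, hxt⟩ := h1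
  rw [h2 x hx] at hxt
  exact Bool.false_ne_true hxt

-- an ∃/∀ clash between a line matching and no line matching is absurd
theorem pvNoAny2 {L K : List String}
    (h1 : ∃ a ∈ L, ∃ x ∈ K, PySem.Chars.isIn x.toList a.toList = true)
    (h2 : ∀ a ∈ L, ∀ x ∈ K, PySem.Chars.isIn x.toList a.toList = false) : False := by
  obtain ⟨a, ha, x, hx, hxt⟩ := h1
  rw [h2 a ha x hx] at hxt
  exact Bool.false_ne_true hxt

-- the flag loop computes the classification from 'does any line match' for each exclude list
theorem dietAltLoop_eq (items : List String) (hv hn : Bool) :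
    dietAltLoop items hv hn =
      (if hv || items.any (fun item => vegetarianExcludeB.any (fun ing => PySem.Str.isIn ing item)) then "none"
      else if hn || items.any (fun item => veganExcludeB.any (fun ing => PySem.Str.isIn ing item)) then "vegetarian"
      else "vegan") := by
  induction items generalizing hv hn with
  | nil => cases hv <;> cases hn <;> simp [dietAltLoop]
  | cons item rest ih =>
    simp only [dietAltLoop, List.any_cons]
    by_cases hP : (vegetarianExcludeB.any fun ing => PySem.Str.isIn ing item) = true <;>
    by_cases hQ : (veganExcludeB.any fun ing => PySem.Str.isIn ing item) = true <;>
    simp only [Bool.not_eq_true] at hP hQ <;>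
    cases hv <;> cases hn <;> simp [ih, -List.any_eq_true] <;> (intros; exfalso; exact pvNoAny ‹(vegetarianExcludeB.any fun ing => PySem.Chars.isIn ing.toList item.toList) = true› ‹∀ x ∈ vegetarianExcludeB, PySem.Chars.isIn x.toList item.toList = false›)

-- ===== VERDICT (by name: the statement is the Claim_ definition above) =====
theorem diet_function_spec : Claim_equal_diet_function := by
  intro e _ _
  unfold Spec_diet_function diet_function diet_function_alt
  rw [dietAltLoop_eq]
  set lines := ((PySem.Dict.mk e).get? "ingredientLines").getD [] with hl
  cases hP : lines.any (fun item => vegetarianExcludeB.any (fun ing => PySem.Str.isIn ing item)) <;>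
  cases hQ : lines.any (fun item => veganExcludeB.any (fun ing => PySem.Str.isIn ing item)) <;>
    simp only [show vegetarianExcludeA = vegetarianExcludeB from rfl,
               show veganExcludeA = veganExcludeB from rfl,
               List.any_eq_true, List.any_eq_false] at hP hQ ⊢ <;>
    simp [pescatarianExcludeA, List.length_eq_zero_iff, List.filter_eq_nil_iff,
          List.any_eq_true, List.length_pos_iff] <;>
    simp_all <;>
    (split_ifs with h1 h2 <;>
      first
        | rfl
        | exact (pvNoAny2 hP h1.1).elim
        | exact (pvNoAny2 hP h2).elim)
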